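-- pv_equiv track=rewrite | github.com/Kulak-Informatica/BeginselenVanProgrammeren | Examen-voorbereiding/17-18_vraag3.py | mo
-- ===== SOURCE A (Python) =====
-- def mo(a, b):
--     # De te berekenen variabelen: sum (s), product (p), quadratic(?) (q)
--     s = p = q = 0
--
--     # help variable for p (and q)
--     sum_of_a = 0
--
--     # Origineel: for va in a: for vb in b:
--     #     s += va - vb
--     #     p += va * vb
--     #     q += (va + vb)**2
--     #
--     # s kan herschreven worden naar s += va voor elke va, en dezelfde va wordt voor elke vb opgeteld, dus:
--     # for va in a: s += va * len(b)
--     # op een gelijkaardige manier moet s -= vb voor elke vb, voor elke va: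
--     # for vb in b: s -= vb * len(a)
--     #
--     # p kan herschreven worden als p += va * (vb1 + vb2 + vb3 + vb4 + ...) voor elke va (of omgekeerd voor elke vb)
--     # dus berekenen we eerst de som sum_of_a voor alle va in a, dan doen we
--     # for vb in b: p += vb * sum_of_a
--     #
--     # q kan herschreven worden als q += (va**2) + (2*va*vb) + (vb**2) voor elke va in a, voor elke vb in b.
--     # Het dubbel product is gelijkaardig aan p, want, na elke va en vb, is de som van al die termen gelijk aan
--     # 2 * p. Dan hoeven we enkel, op een gelijkaardige manier als s, nog de termen va**2 en vb**2 toe te voegen. Dus: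
--     # for va in a: q += (va**2) * len(b)
--     # for vb in b: q += (vb**2) * len(a)
--     # q += 2 * p
--     #
--     # Op die manier lopen we 1 keer door de a-lijst en 1 keer door de b-lijst, ipv voor elke va door de b-lijst te gaan.
--     for va in a:
--         s += va * len(b)
--         sum_of_a += va
--         q += (va**2) * len(b)
--
--     for vb in b:
--         s -= vb * len(a)
--         p += vb * sum_of_a
--         q += (vb**2) * len(a)
--
--     q += 2 * p  # dubbel product bij q nog op tellen
--
--     return s, p, q
-- ===== SOURCE B (Python) =====
-- def mo(a, b):
--     s = p = q = 0
--     for va in a: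
--         for vb in b:
--             s += va - vb
--             p += va * vb
--             q += (va + vb) ** 2
--     return s, p, q
-- ===== Notes on version B (the rewrite author's own statement) =====
-- stated objective: simpler
-- what changed: Replaces A's two single-pass loops with fused accumulators and a shared-sum trick by the direct nested loop over all pairs, accumulating s, p, q per pair.
import Mathlib
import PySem

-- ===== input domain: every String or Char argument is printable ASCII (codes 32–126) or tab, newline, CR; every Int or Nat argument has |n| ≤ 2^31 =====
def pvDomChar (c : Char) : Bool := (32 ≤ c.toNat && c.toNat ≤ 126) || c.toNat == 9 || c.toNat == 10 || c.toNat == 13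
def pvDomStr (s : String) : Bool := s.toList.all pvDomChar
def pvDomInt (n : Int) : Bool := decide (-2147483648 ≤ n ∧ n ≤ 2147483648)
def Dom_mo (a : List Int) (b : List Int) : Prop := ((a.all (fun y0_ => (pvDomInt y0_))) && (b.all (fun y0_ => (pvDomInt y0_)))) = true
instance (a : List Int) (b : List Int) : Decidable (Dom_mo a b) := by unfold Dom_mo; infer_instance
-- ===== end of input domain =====

-- B is the direct nested loop over all pairs (the plain reading of the task),
-- instead of A's two single-pass loops with fused accumulators; objective: simpler.

-- ===== PORT A =====
-- first loop of A: state (s, sum_of_a, q)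
def moLoopA (lb : Int) : List Int → (Int × Int × Int) → (Int × Int × Int)
  | [], st => st
  | va :: rest, (s, soa, q) => moLoopA lb rest (s + va * lb, soa + va, q + va ^ 2 * lb)

-- second loop of A: state (s, p, q)
def moLoopB (la soa : Int) : List Int → (Int × Int × Int) → (Int × Int × Int)
  | [], st => st
  | vb :: rest, (s, p, q) => moLoopB la soa rest (s - vb * la, p + vb * soa, q + vb ^ 2 * la)

def mo (a : List Int) (b : List Int) : Int × Int × Int :=
  let (s1, soa, q1) := moLoopA (b.length : Int) a (0, 0, 0)
  let (s2, p2, q2) := moLoopB (a.length : Int) soa b (s1, 0, q1)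
  (s2, p2, q2 + 2 * p2)

-- ===== PORT B =====
-- inner loop of B: one fixed va against every vb
def moAltInner (va : Int) : List Int → (Int × Int × Int) → (Int × Int × Int)
  | [], st => st
  | vb :: rest, (s, p, q) =>
      moAltInner va rest (s + (va - vb), p + va * vb, q + (va + vb) ^ 2)

-- outer loop of B over a
def moAltOuter (b : List Int) : List Int → (Int × Int × Int) → (Int × Int × Int)
  | [], st => st
  | va :: rest, st => moAltOuter b rest (moAltInner va b st)

def mo_alt (a : List Int) (b : List Int) : Int × Int × Int :=
  moAltOuter b a (0, 0, 0)

-- ===== PRECONDITION & SPEC =====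
def Spec_mo (a : List Int) (b : List Int) (out : Int × Int × Int) : Prop := out = mo_alt a b
instance (a : List Int) (b : List Int) (out : Int × Int × Int) : Decidable (Spec_mo a b out) := by unfold Spec_mo; infer_instance

-- ===== CLAIM (what is proved, stated in full; the proofs are below) =====
def Claim_equal_mo : Prop := ∀ (a : List Int) (b : List Int), Dom_mo a b → Spec_mo a b (mo a b)

-- ===== LEMMAS AND PROOFS =====
theorem moLoopA_eq (lb : Int) (a : List Int) (s soa q : Int) :
    moLoopA lb a (s, soa, q) =
      (s + a.sum * lb, soa + a.sum, q + (a.map (fun x => x * x)).sum * lb) := by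
  induction a generalizing s soa q with
  | nil => simp [moLoopA]
  | cons va rest ih =>
      simp only [moLoopA, ih, List.sum_cons, List.map_cons, Prod.mk.injEq]
      refine ⟨by ring, by ring, by ring⟩

theorem moLoopB_eq (la soa : Int) (b : List Int) (s p q : Int) :
    moLoopB la soa b (s, p, q) =
      (s - b.sum * la, p + b.sum * soa, q + (b.map (fun x => x * x)).sum * la) := by
  induction b generalizing s p q with
  | nil => simp [moLoopB]
  | cons vb rest ih =>
      simp only [moLoopB, ih, List.sum_cons, List.map_cons, Prod.mk.injEq]
      refine ⟨by ring, by ring, by ring⟩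

theorem moAltInner_eq (va : Int) (b : List Int) (s p q : Int) :
    moAltInner va b (s, p, q) =
      (s + va * (b.length : Int) - b.sum,
       p + va * b.sum,
       q + va ^ 2 * (b.length : Int) + 2 * va * b.sum + (b.map (fun x => x * x)).sum) := by
  induction b generalizing s p q with
  | nil => simp [moAltInner]
  | cons vb rest ih =>
      simp only [moAltInner, ih, List.sum_cons, List.map_cons, List.length_cons,
        Prod.mk.injEq]
      push_cast
      refine ⟨by ring, by ring, by ring⟩

theorem moAltOuter_eq (b : List Int) (a : List Int) (s p q : Int) :
    moAltOuter b a (s, p, q) =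
      (s + a.sum * (b.length : Int) - (a.length : Int) * b.sum,
       p + a.sum * b.sum,
       q + (a.map (fun x => x * x)).sum * (b.length : Int)
         + 2 * a.sum * b.sum
         + (a.length : Int) * (b.map (fun x => x * x)).sum) := by
  induction a generalizing s p q with
  | nil => simp [moAltOuter]
  | cons va rest ih =>
      simp only [moAltOuter, moAltInner_eq, ih, List.sum_cons, List.map_cons,
        List.length_cons, Prod.mk.injEq]
      push_cast
      refine ⟨by ring, by ring, by ring⟩

-- ===== VERDICT (by name: the statement is the Claim_ definition above) =====
theorem mo_spec : Claim_equal_mo := by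
  intro a b _
  unfold Spec_mo mo mo_alt
  simp only [moLoopA_eq, moLoopB_eq, moAltOuter_eq, Prod.mk.injEq]
  refine ⟨by ring, by ring, by ring⟩
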